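-- pv_equiv track=rewrite | github.com/rosencrantz96/Algorithm | 프로그래머스/1/64061. 크레인 인형뽑기 게임/크레인 인형뽑기 게임.py | solution
-- ===== SOURCE A (Python) =====
-- def solution(board, moves):
--     lanes = [[ ] for _ in range(len(board[0]))]
--
--     for i in range(len(board) - 1, - 1, - 1):
--         for j in range(len(board[0])):
--             if board[i][j]:
--                 lanes[j].append(board[i][j])
--
--     bucket = [ ]
--     answer = 0
--
--     for m in moves:
--         if lanes[m - 1]:
--             doll = lanes[m - 1].pop()
--
--             if bucket and bucket[-1] == doll:
--                 bucket.pop()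
--                 answer += 2
--             else:
--                 bucket.append(doll)
--
--     return answer
-- ===== SOURCE B (Python) =====
-- def solution(board, moves):
--     rows, cols = len(board), len(board[0])
--     top = [0] * cols          # next candidate row per column; no lane stacks built
--     bucket = []
--     answer = 0
--     for m in moves:
--         c = m - 1
--         r = top[c]
--         while r < rows and board[r][c] == 0:
--             r += 1
--         if r < rows:
--             top[c] = r + 1
--             doll = board[r][c]
--             if bucket and bucket[-1] == doll:
--                 bucket.pop()
--                 answer += 2
--             else:
--                 bucket.append(doll)
--     return answer
-- ===== Notes on version B (the rewrite author's own statement) =====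
-- stated objective: alternative
-- what changed: B builds no lane stacks: it keeps one next-row pointer per column and scans the board column on demand per move, skipping zeros, instead of A's upfront bottom-up pass that copies every cell into per-column stacks; Pre_ excludes ragged boards (a row longer than the first) combined with non-positive moves, a corner where A's lane pick via negative-index wraparound over the lanes list and B's direct negative indexing into a longer row defensibly select different cells.
-- outside the precondition, e.g. on solution([[3, 5], [2, 5, 7]], [0, 0]): A returns 2, B returns 0
import Mathlib
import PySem

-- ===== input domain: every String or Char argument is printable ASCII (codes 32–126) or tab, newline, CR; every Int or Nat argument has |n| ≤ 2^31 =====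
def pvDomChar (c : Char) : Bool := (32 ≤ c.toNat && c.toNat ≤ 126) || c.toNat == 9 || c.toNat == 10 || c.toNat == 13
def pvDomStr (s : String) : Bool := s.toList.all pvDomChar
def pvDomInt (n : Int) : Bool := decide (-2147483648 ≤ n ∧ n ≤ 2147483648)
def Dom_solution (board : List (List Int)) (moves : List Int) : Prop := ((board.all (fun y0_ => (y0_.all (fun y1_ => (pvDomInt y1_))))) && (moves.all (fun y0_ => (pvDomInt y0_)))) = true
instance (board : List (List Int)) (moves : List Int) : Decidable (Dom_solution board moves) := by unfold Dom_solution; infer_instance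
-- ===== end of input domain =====

-- B replaces A's upfront lane-stack construction by one next-row pointer per column,
-- scanned on demand per move (alternative decomposition; return value only).

-- ===== PORT A =====
-- one row of A's lane-building double loop: for j in range(cols): if board[i][j]: lanes[j].append(...)
def pvBuildInner (board : List (List Int)) (cols : Nat) (i : Int) (lanes : List (List Int)) : List (List Int) :=
  (PySem.List.pyRange 0 (cols : Int) 1).foldl (fun lanes j =>
    let v := PySem.List.pyGetD (PySem.List.pyGetD board i []) j 0
    if v ≠ 0 then PySem.List.pySetD lanes j ((PySem.List.pyGetD lanes j []) ++ [v]) else lanes) lanes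

-- body of A's move loop (state = (lanes, bucket, answer))
def pvStepA (st : List (List Int) × List Int × Int) (m : Int) : List (List Int) × List Int × Int :=
  let lanes := st.1
  let bucket := st.2.1
  let answer := st.2.2
  let lane := PySem.List.pyGetD lanes (m - 1) []
  if lane ≠ [] then
    let doll := (lane.getLast?).getD 0          -- lanes[m-1].pop() on a guarded-nonempty list
    let lanes := PySem.List.pySetD lanes (m - 1) lane.dropLast
    if bucket ≠ [] ∧ PySem.List.pyGetD bucket (-1) 0 = doll then
      (lanes, bucket.dropLast, answer + 2)
    else
      (lanes, bucket ++ [doll], answer)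
  else st

def solution (board : List (List Int)) (moves : List Int) : Int :=
  let cols := (PySem.List.pyGetD board 0 []).length
  let lanes := (PySem.List.pyRange ((board.length : Int) - 1) (-1) (-1)).foldl
    (fun lanes i => pvBuildInner board cols i lanes) (List.replicate cols [])
  (moves.foldl pvStepA (lanes, ([] : List Int), (0 : Int))).2.2

-- ===== PORT B =====
-- Source B's while loop: scan rows from r down for the first nonzero cell at row index c (c = m-1, may be negative)
def pvScan (board : List (List Int)) (c : Int) (r : Nat) : Nat :=
  if h : r < board.length then
    if PySem.List.pyGetD (board[r]'h) c 0 = 0 then pvScan board c (r + 1) else r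
  else r
termination_by board.length - r

-- body of B's move loop (state = (top, bucket, answer))
def pvStepB (board : List (List Int)) (st : List Nat × List Int × Int) (m : Int) : List Nat × List Int × Int :=
  let top := st.1
  let bucket := st.2.1
  let answer := st.2.2
  let r := PySem.List.pyGetD top (m - 1) 0
  let r' := pvScan board (m - 1) r
  if h : r' < board.length then
    let top := PySem.List.pySetD top (m - 1) (r' + 1)
    let doll := PySem.List.pyGetD (board[r']'h) (m - 1) 0
    if bucket ≠ [] ∧ PySem.List.pyGetD bucket (-1) 0 = doll then
      (top, bucket.dropLast, answer + 2)
    else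
      (top, bucket ++ [doll], answer)
  else st

def solution_alt (board : List (List Int)) (moves : List Int) : Int :=
  let cols := (PySem.List.pyGetD board 0 []).length
  (moves.foldl (pvStepB board) (List.replicate cols 0, ([] : List Int), (0 : Int))).2.2

-- ===== PRECONDITION & SPEC =====
-- Pre_ is where A returns (first row exists, every row reaches its width, every lane index m-1
-- in range) MINUS one defensible corner it also mentions: ragged boards (a row longer than the
-- first) combined with non-positive moves, where A's lane pick via negative-index wraparound
-- over the lanes list and B's direct negative indexing into a longer row select different cells.
def Pre_solution (board : List (List Int)) (moves : List Int) : Prop :=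
  board ≠ [] ∧
  (∀ row ∈ board, (PySem.List.pyGetD board 0 []).length ≤ row.length) ∧
  (∀ m ∈ moves, -((PySem.List.pyGetD board 0 []).length : Int) ≤ m - 1 ∧
      m - 1 < ((PySem.List.pyGetD board 0 []).length : Int)) ∧
  ((∀ row ∈ board, row.length = (PySem.List.pyGetD board 0 []).length) ∨ (∀ m ∈ moves, 1 ≤ m))
instance (board : List (List Int)) (moves : List Int) : Decidable (Pre_solution board moves) := by
  unfold Pre_solution; infer_instance

def pvWitness_solution : List (List Int) × List Int := ([[1, 2], [0, 3]], [1, 2, 2])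

def Spec_solution (board : List (List Int)) (moves : List Int) (out : Int) : Prop := out = solution_alt board moves
instance (board : List (List Int)) (moves : List Int) (out : Int) : Decidable (Spec_solution board moves out) := by unfold Spec_solution; infer_instance

-- ===== CLAIM (what is proved, stated in full; the proofs are below) =====
def Claim_equal_solution : Prop := ∀ (board : List (List Int)) (moves : List Int), Dom_solution board moves → Pre_solution board moves → Spec_solution board moves (solution board moves)

-- ===== LEMMAS AND PROOFS =====
-- remaining dolls of column c from row t downward (top to bottom)
def pvColFrom (board : List (List Int)) (c t : Nat) : List Int :=
  ((board.drop t).map (fun row => row.getD c 0)).filter (fun v => v != 0)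

-- Python wrapped indexing / assignment, normalized to a Nat index
theorem pvGetD_wrap {α : Type} (xs : List α) (i : Int) (d : α) (h1 : -(xs.length:Int) ≤ i) (h2 : i < (xs.length:Int)) :
    PySem.List.pyGetD xs i d = xs.getD (if i < 0 then (i + xs.length).toNat else i.toNat) d := by
  unfold PySem.List.pyGetD PySem.List.pyGet? PySem.List.pyIdx?
  by_cases h : 0 ≤ i
  · rw [if_pos h, if_pos h2, if_neg (by omega)]
    simp [List.getD_eq_getElem?_getD]
  · rw [if_neg h, if_pos h1, if_pos (by omega)]
    simp only [Option.bind]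
    rw [List.getD_eq_getElem?_getD]
    congr 2
    omega

theorem pvSetD_wrap {α : Type} (xs : List α) (i : Int) (v : α) (h1 : -(xs.length:Int) ≤ i) (h2 : i < (xs.length:Int)) :
    PySem.List.pySetD xs i v = xs.set (if i < 0 then (i + xs.length).toNat else i.toNat) v := by
  unfold PySem.List.pySetD PySem.List.pySet? PySem.List.pyIdx?
  by_cases h : 0 ≤ i
  · rw [if_pos h, if_pos h2, if_neg (by omega)]
    simp
  · rw [if_neg h, if_pos h1, if_pos (by omega)]
    simp only [Option.map_some, Option.getD_some]
    congr 1
    omega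

-- under Pre_, indexing any row of the board at m-1 hits one fixed column c
theorem pvRow_eq (board : List (List Int)) (cols : Nat) (m : Int)
    (hm1 : -(cols:Int) ≤ m - 1) (hm2 : m - 1 < (cols:Int))
    (hge : ∀ row ∈ board, cols ≤ row.length)
    (hcase : (∀ row ∈ board, row.length = cols) ∨ 1 ≤ m) :
    ∃ c : Nat, c < cols ∧ (c:Int) = (if m - 1 < 0 then m - 1 + (cols:Int) else m - 1) ∧
      ∀ (i : Nat) (h : i < board.length),
        PySem.List.pyGetD (board[i]'h) (m - 1) 0 = (board[i]'h).getD c 0 := by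
  refine ⟨(if m - 1 < 0 then m - 1 + (cols:Int) else m - 1).toNat, by split_ifs <;> omega,
    by split_ifs <;> omega, ?_⟩
  intro i h
  have hmem : board[i]'h ∈ board := List.getElem_mem h
  have hlen : cols ≤ (board[i]'h).length := hge _ hmem
  rw [pvGetD_wrap _ _ _ (by omega) (by omega)]
  congr 1
  by_cases hneg : m - 1 < 0
  · have hrect : (board[i]'h).length = cols := by
      rcases hcase with hr | hpos
      · exact hr _ hmem
      · omega
    rw [if_pos hneg, if_pos hneg, hrect]
  · rw [if_neg hneg, if_neg hneg]

-- the while-loop scan computes the head/tail decomposition of pvColFrom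
theorem pvScan_colFrom (board : List (List Int)) (cI : Int) (c : Nat)
    (hrow : ∀ (i : Nat) (h : i < board.length),
      PySem.List.pyGetD (board[i]'h) cI 0 = (board[i]'h).getD c 0) : ∀ (t : Nat),
    pvColFrom board c t =
      if h : pvScan board cI t < board.length then
        ((board[pvScan board cI t]'h).getD c 0) :: pvColFrom board c (pvScan board cI t + 1)
      else [] := by
  intro t
  induction t using pvScan.induct (board := board) (c := cI) with
  | case1 t h hz ih =>
    have hs : pvScan board cI t = pvScan board cI (t + 1) := by
      conv_lhs => rw [pvScan.eq_def]
      rw [dif_pos h, if_pos hz]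
    rw [hrow t h] at hz
    have hz' : (board[t]'h)[c]?.getD 0 = 0 := by rw [← List.getD_eq_getElem?_getD]; exact hz
    rw [hs, ← ih]
    unfold pvColFrom
    rw [List.drop_eq_getElem_cons h, List.map_cons, List.filter_cons]
    simp [hz']
  | case2 t h hz =>
    have hs : pvScan board cI t = t := by
      conv_lhs => rw [pvScan.eq_def]
      rw [dif_pos h, if_neg hz]
    rw [hrow t h] at hz
    have hz' : ¬ (board[t]'h)[c]?.getD 0 = 0 := by rw [← List.getD_eq_getElem?_getD]; exact hz
    rw [hs, dif_pos h]
    unfold pvColFrom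
    rw [List.drop_eq_getElem_cons h, List.map_cons, List.filter_cons]
    simp [hz']
  | case3 t h =>
    have hs : pvScan board cI t = t := by
      conv_lhs => rw [pvScan.eq_def]
      rw [dif_neg h]
    rw [hs, dif_neg h]
    unfold pvColFrom
    rw [List.drop_eq_nil_of_le (by omega)]
    simp

-- the appended-per-row contribution of row i to column k
def pvE (board : List (List Int)) (i : Int) (k : Nat) : List Int :=
  if (PySem.List.pyGetD board i []).getD k 0 ≠ 0 then [(PySem.List.pyGetD board i []).getD k 0] else []

def pvInnerFold (board : List (List Int)) (cols : Nat) (i : Int) (s : Nat) (L : List (List Int)) : List (List Int) :=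
  (PySem.List.pyRange (s:Int) (cols:Int) 1).foldl (fun lanes j =>
    let v := PySem.List.pyGetD (PySem.List.pyGetD board i []) j 0
    if v ≠ 0 then PySem.List.pySetD lanes j ((PySem.List.pyGetD lanes j []) ++ [v]) else lanes) L

theorem pvBuildInner_eq_fold (board : List (List Int)) (cols : Nat) (i : Int) (L : List (List Int)) :
    pvBuildInner board cols i L = pvInnerFold board cols i 0 L := by
  unfold pvBuildInner pvInnerFold
  norm_num

theorem pvInner_aux (board : List (List Int)) (cols : Nat) (i : Int) :
    ∀ (d s : Nat) (L : List (List Int)), cols - s ≤ d → L.length = cols →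
      (pvInnerFold board cols i s L).length = cols ∧
      ∀ k, k < cols → (pvInnerFold board cols i s L).getD k [] =
        if s ≤ k then L.getD k [] ++ pvE board i k else L.getD k [] := by
  intro d
  induction d with
  | zero =>
    intro s L hd hL
    have hcs : cols ≤ s := by omega
    unfold pvInnerFold
    rw [PySem.List.pyRange_one_eq_nil (by exact_mod_cast hcs)]
    refine ⟨hL, fun k hk => ?_⟩
    rw [if_neg (by omega)]
    rfl
  | succ d ih =>
    intro s L hd hL
    by_cases hcs : cols ≤ s
    · unfold pvInnerFold
      rw [PySem.List.pyRange_one_eq_nil (by exact_mod_cast hcs)]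
      refine ⟨hL, fun k hk => ?_⟩
      rw [if_neg (by omega)]
      rfl
    · replace hcs : s < cols := by omega
      have hrange : PySem.List.pyRange (s:Int) (cols:Int) 1 = (s:Int) :: PySem.List.pyRange ((s:Int)+1) (cols:Int) 1 :=
        PySem.List.pyRange_one_cons (by exact_mod_cast hcs)
      set v := (PySem.List.pyGetD board i []).getD s 0 with hv
      -- the state after processing index s
      have hstep : pvInnerFold board cols i s L = pvInnerFold board cols i (s+1)
          (if v ≠ 0 then L.set s (L.getD s [] ++ [v]) else L) := by
        unfold pvInnerFold
        rw [hrange, List.foldl_cons]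
        have hcast : ((s:Int)+1) = (((s+1:Nat)):Int) := by push_cast; ring
        rw [hcast]
        congr 1
        simp only [PySem.List.pyGetD_natCast, PySem.List.pySetD_natCast]
        rw [hv]
      set L' := (if v ≠ 0 then L.set s (L.getD s [] ++ [v]) else L) with hL'
      have hL'len : L'.length = cols := by
        rw [hL']; split_ifs <;> simp [hL]
      have hL'getD : ∀ k, k < cols → L'.getD k [] = if k = s then L.getD k [] ++ pvE board i k else L.getD k [] := by
        intro k hk
        have hpvE : pvE board i s = if v ≠ 0 then [v] else [] := by
          unfold pvE; rw [← hv]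
        by_cases hks : k = s
        · subst hks
          rw [if_pos rfl, hpvE, hL']
          by_cases h0 : v ≠ 0
          · rw [if_pos h0, if_pos h0, List.getD_eq_getElem?_getD, List.getElem?_set,
              if_pos rfl, if_pos (by omega)]
            simp only [Option.getD_some]
          · rw [if_neg h0, if_neg h0, List.append_nil]
        · rw [if_neg hks, hL']
          by_cases h0 : v ≠ 0
          · rw [if_pos h0, List.getD_eq_getElem?_getD, List.getElem?_set,
              if_neg (fun hh => hks hh.symm), ← List.getD_eq_getElem?_getD]
          · rw [if_neg h0]
      obtain ⟨hlen2, hget2⟩ := ih (s+1) L' (by omega) hL'len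
      rw [hstep]
      refine ⟨hlen2, fun k hk => ?_⟩
      rw [hget2 k hk]
      by_cases hks : k = s
      · subst hks
        rw [if_neg (by omega), if_pos (le_refl _), hL'getD _ hk, if_pos rfl]
      · by_cases hsk : s ≤ k
        · rw [if_pos (by omega), if_pos hsk, hL'getD _ hk, if_neg hks]
        · rw [if_neg (by omega), if_neg hsk, hL'getD _ hk, if_neg hks]

def pvBuildFold (board : List (List Int)) (cols : Nat) (t : Nat) (L : List (List Int)) : List (List Int) :=
  (PySem.List.pyRange ((t:Int) - 1) (-1) (-1)).foldl (fun lanes i => pvBuildInner board cols i lanes) L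

theorem pvBuild_aux (board : List (List Int)) (cols : Nat) :
    ∀ (t : Nat), t ≤ board.length → ∀ (L : List (List Int)), L.length = cols →
      (pvBuildFold board cols t L).length = cols ∧
      ∀ k, k < cols → (pvBuildFold board cols t L).getD k [] =
        L.getD k [] ++ (((board.take t).map (fun row => row.getD k 0)).filter (fun v => v != 0)).reverse := by
  intro t
  induction t with
  | zero =>
    intro _ L hL
    unfold pvBuildFold
    rw [show (((0:Nat):Int) - 1) = (-1:Int) by norm_num,
        PySem.List.pyRange_neg_one_eq_nil (by norm_num)]
    exact ⟨hL, fun k hk => by simp⟩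
  | succ t ih =>
    intro ht L hL
    have htl : t < board.length := by omega
    unfold pvBuildFold
    rw [show (((t+1:Nat):Int) - 1) = ((t:Nat):Int) by push_cast; ring,
        PySem.List.pyRange_neg_one_cons (by exact_mod_cast Int.lt_of_lt_of_le (by norm_num) (Int.natCast_nonneg t)), List.foldl_cons]
    -- first row t is processed, then rows t-1 .. 0
    have hinner := pvInner_aux board cols (t:Int) cols 0 L (by omega) hL
    rw [pvBuildInner_eq_fold]
    obtain ⟨hlen1, hget1⟩ := hinner
    obtain ⟨hlen2, hget2⟩ := ih (by omega) (pvInnerFold board cols (t:Int) 0 L) hlen1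
    unfold pvBuildFold at hlen2 hget2
    refine ⟨hlen2, fun k hk => ?_⟩
    rw [hget2 k hk, hget1 k hk, if_pos (Nat.zero_le _)]
    rw [List.take_add_one]
    have hsome : board[t]? = some (board[t]'htl) := List.getElem?_eq_getElem htl
    rw [hsome]
    simp only [Option.toList_some, List.map_append, List.filter_append, List.reverse_append,
      List.map_cons, List.map_nil, List.filter_cons]
    have hrow : PySem.List.pyGetD board ((t:Nat):Int) [] = board[t]'htl := by
      rw [PySem.List.pyGetD_natCast, List.getD_eq_getElem board [] htl]
    rw [List.append_assoc]
    congr 1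
    unfold pvE
    rw [hrow]
    simp only [List.getD_eq_getElem?_getD, List.filter_nil]
    by_cases h0 : (board[t]'htl)[k]?.getD 0 = 0
    · simp [h0]
    · simp [h0]

-- one move keeps the simulation relation between A's lanes and B's pointers
theorem pvStep_eq (board : List (List Int)) (cols : Nat) (m : Int) (c : Nat)
    (h1 : -((cols:Nat):Int) ≤ m - 1) (h2 : m - 1 < ((cols:Nat):Int))
    (hclt : c < cols) (hcval : (c:Int) = (if m - 1 < 0 then m - 1 + (cols:Int) else m - 1))
    (hrow : ∀ (i : Nat) (h : i < board.length),
      PySem.List.pyGetD (board[i]'h) (m - 1) 0 = (board[i]'h).getD c 0)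
    (lanes : List (List Int)) (top : List Nat) (bucket : List Int) (answer : Int)
    (hl : lanes.length = cols) (ht : top.length = cols)
    (hinv : ∀ k, k < cols → lanes.getD k [] = (pvColFrom board k (top.getD k 0)).reverse) :
    (pvStepA (lanes, bucket, answer) m).1.length = cols ∧
    (pvStepB board (top, bucket, answer) m).1.length = cols ∧
    (pvStepA (lanes, bucket, answer) m).2 = (pvStepB board (top, bucket, answer) m).2 ∧
    (∀ k, k < cols → (pvStepA (lanes, bucket, answer) m).1.getD k [] =
      (pvColFrom board k ((pvStepB board (top, bucket, answer) m).1.getD k 0)).reverse) := by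
  have hcnormA : (if m - 1 < 0 then (m - 1 + lanes.length).toNat else (m - 1).toNat) = c := by
    rw [hl]; split_ifs with hn <;> [skip; skip] <;>
      (first | (rw [if_pos hn] at hcval; omega) | (rw [if_neg hn] at hcval; omega))
  have hcnormT : (if m - 1 < 0 then (m - 1 + top.length).toNat else (m - 1).toNat) = c := by
    rw [ht]; split_ifs with hn <;>
      (first | (rw [if_pos hn] at hcval; omega) | (rw [if_neg hn] at hcval; omega))
  have hgetlane : PySem.List.pyGetD lanes (m - 1) [] = lanes.getD c [] := by
    rw [pvGetD_wrap lanes (m-1) [] (by rw [hl]; exact h1) (by rw [hl]; exact h2), hcnormA]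
  have hsetlane : ∀ v, PySem.List.pySetD lanes (m - 1) v = lanes.set c v := by
    intro v
    rw [pvSetD_wrap lanes (m-1) v (by rw [hl]; exact h1) (by rw [hl]; exact h2), hcnormA]
  have hgettop : PySem.List.pyGetD top (m - 1) 0 = top.getD c 0 := by
    rw [pvGetD_wrap top (m-1) 0 (by rw [ht]; exact h1) (by rw [ht]; exact h2), hcnormT]
  have hsettop : ∀ v, PySem.List.pySetD top (m - 1) v = top.set c v := by
    intro v
    rw [pvSetD_wrap top (m-1) v (by rw [ht]; exact h1) (by rw [ht]; exact h2), hcnormT]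
  set tC := top.getD c 0 with htC
  set r := pvScan board (m - 1) tC with hr
  have hscan := pvScan_colFrom board (m - 1) c hrow tC
  rw [← hr] at hscan
  by_cases hrlt : r < board.length
  · -- a doll is found: both sides pop the same doll
    rw [dif_pos hrlt] at hscan
    set doll := (board[r]'hrlt).getD c 0 with hdoll
    have hlane : lanes.getD c [] = (pvColFrom board c tC).reverse := hinv c hclt
    have hlane2 : lanes.getD c [] = (pvColFrom board c (r+1)).reverse ++ [doll] := by
      rw [hlane, hscan]
      simp
    have hlanene : lanes.getD c [] ≠ [] := by rw [hlane2]; simp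
    -- unfold both steps
    unfold pvStepA pvStepB
    simp only
    rw [hgetlane, if_pos hlanene, hgettop]
    rw [dif_pos (show pvScan board (m-1) (top.getD c 0) < board.length from hrlt)]
    rw [hlane2]
    rw [List.getLast?_concat, List.dropLast_concat]
    simp only [Option.getD_some]
    rw [hsetlane, hsettop, hrow r hrlt, ← hdoll]
    have hAlen : (lanes.set c (pvColFrom board c (r+1)).reverse).length = cols := by simp [hl]
    have hBlen : (top.set c (r+1)).length = cols := by simp [ht]
    have hAget : ∀ k, k < cols → (lanes.set c (pvColFrom board c (r+1)).reverse).getD k [] =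
        (pvColFrom board k ((top.set c (r+1)).getD k 0)).reverse := by
      intro k hk
      simp only [List.getD_eq_getElem?_getD, List.getElem?_set]
      by_cases hkc : c = k
      · subst hkc
        rw [if_pos rfl, if_pos (by omega), if_pos rfl, if_pos (by omega)]
        simp
      · rw [if_neg hkc, if_neg hkc]
        have hi := hinv k hk
        simp only [List.getD_eq_getElem?_getD] at hi
        exact hi
    split_ifs with hb
    · exact ⟨hAlen, hBlen, rfl, hAget⟩
    · exact ⟨hAlen, hBlen, rfl, hAget⟩
  · -- the column is exhausted: both sides skip
    rw [dif_neg hrlt] at hscan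
    have hlane : lanes.getD c [] = [] := by
      rw [hinv c hclt, hscan]
      rfl
    unfold pvStepA pvStepB
    simp only
    rw [hgetlane, if_neg (by simpa using hlane), hgettop]
    rw [dif_neg (show ¬ pvScan board (m-1) (top.getD c 0) < board.length from hrlt)]
    exact ⟨hl, ht, rfl, hinv⟩

theorem pvLoop_eq (board : List (List Int)) (cols : Nat)
    (hge : ∀ row ∈ board, cols ≤ row.length) :
    ∀ (moves : List Int), (∀ m ∈ moves, -((cols:Nat):Int) ≤ m - 1 ∧ m - 1 < ((cols:Nat):Int)) →
    ((∀ row ∈ board, row.length = cols) ∨ (∀ m ∈ moves, 1 ≤ m)) →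
    ∀ (lanes : List (List Int)) (top : List Nat) (bucket : List Int) (answer : Int),
      lanes.length = cols → top.length = cols →
      (∀ k, k < cols → lanes.getD k [] = (pvColFrom board k (top.getD k 0)).reverse) →
      (moves.foldl pvStepA (lanes, bucket, answer)).2.2 =
      (moves.foldl (pvStepB board) (top, bucket, answer)).2.2 := by
  intro moves
  induction moves with
  | nil => intro _ _ lanes top bucket answer _ _ _; rfl
  | cons m ms ih =>
    intro hmv hcase lanes top bucket answer hl ht hinv
    obtain ⟨hm1, hm2⟩ := hmv m (List.mem_cons_self)
    obtain ⟨c, hclt, hcval, hrow⟩ := pvRow_eq board cols m hm1 hm2 hge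
      (hcase.imp id (fun h => h m List.mem_cons_self))
    obtain ⟨hA, hB, h2, hget⟩ := pvStep_eq board cols m c hm1 hm2 hclt hcval hrow lanes top bucket answer hl ht hinv
    simp only [List.foldl_cons]
    rcases hsa : pvStepA (lanes, bucket, answer) m with ⟨lanes', rest'⟩
    rcases hsb : pvStepB board (top, bucket, answer) m with ⟨top', restB'⟩
    rw [hsa] at hA h2 hget
    rw [hsb] at hB h2 hget
    simp only at hA hB h2 hget
    subst h2
    rcases rest' with ⟨bucket', answer'⟩
    exact ih (fun x hx => hmv x (List.mem_cons_of_mem _ hx))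
      (hcase.imp id (fun h x hx => h x (List.mem_cons_of_mem _ hx)))
      lanes' top' bucket' answer' hA hB hget

-- ===== VERDICT (by name: the statement is the Claim_ definition above) =====
theorem solution_spec : Claim_equal_solution := by
  intro board moves _ hpre
  obtain ⟨hbne, hrows, hmv, hcase⟩ := hpre
  unfold Spec_solution solution solution_alt
  set cols := (PySem.List.pyGetD board 0 []).length with hcols
  simp only
  have hbuild := pvBuild_aux board cols board.length (le_refl _) (List.replicate cols []) (by simp)
  obtain ⟨hlen, hget⟩ := hbuild
  refine pvLoop_eq board cols hrows moves hmv hcase _ _ [] 0 hlen (by simp) ?_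
  intro k hk
  show (pvBuildFold board cols board.length (List.replicate cols [])).getD k [] =
    (pvColFrom board k ((List.replicate cols 0).getD k 0)).reverse
  rw [hget k hk]
  simp only [List.getD_eq_getElem?_getD, List.getElem?_replicate]
  rw [if_pos hk]
  simp only [Option.getD_some, List.take_length, List.nil_append]
  unfold pvColFrom
  simp
  rw [if_pos hk]
  simp
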